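-- pv_equiv track=rewrite | github.com/tirtha-v/LLMap | peft_eval.py | extract_label_from_output
-- ===== SOURCE A (Python) =====
-- from typing import Dict, List, Tuple
--
-- def extract_label_from_output(output_text: str, label_list: List[str]) -> str:
--     """
--     Same heuristic as in icl_eval.py: try exact match, substring, then prefix.
--     """
--     text_lower = output_text.strip().lower()
--
--     # exact match
--     for lab in label_list:
--         if text_lower == lab.lower():
--             return lab
--
--     # substring search
--     for lab in label_list:
--         if lab.lower() in text_lower:
--             return lab
--
--     # prefix match
--     if text_lower:
--         first_token = text_lower.split()[0]
--         for lab in label_list: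
--             if lab.lower().startswith(first_token):
--                 return lab
--
--     # fallback
--     return label_list[0]
-- ===== SOURCE B (Python) =====
-- def extract_label_from_output(output_text, label_list):
--     text_lower = output_text.strip().lower()
--     first_token = text_lower.split()[0] if text_lower else None
--     best_cat, best = 3, None  # 1 = substring, 2 = prefix; lower wins, first hit kept
--     for lab in label_list:
--         ll = lab.lower()
--         if text_lower == ll:
--             return lab  # exact match: nothing can beat it
--         if best_cat > 1 and ll in text_lower:
--             best_cat, best = 1, lab
--         elif best_cat > 2 and first_token is not None and ll.startswith(first_token):
--             best_cat, best = 2, lab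
--     return best if best is not None else label_list[0]
-- ===== Notes on version B (the rewrite author's own statement) =====
-- stated objective: alternative
-- what changed: A's three sequential scans (exact, then substring, then prefix) are replaced by a single pass over the labels that computes each label's best matching category once and keeps the (category, first-index)-minimal label.
import Mathlib
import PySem

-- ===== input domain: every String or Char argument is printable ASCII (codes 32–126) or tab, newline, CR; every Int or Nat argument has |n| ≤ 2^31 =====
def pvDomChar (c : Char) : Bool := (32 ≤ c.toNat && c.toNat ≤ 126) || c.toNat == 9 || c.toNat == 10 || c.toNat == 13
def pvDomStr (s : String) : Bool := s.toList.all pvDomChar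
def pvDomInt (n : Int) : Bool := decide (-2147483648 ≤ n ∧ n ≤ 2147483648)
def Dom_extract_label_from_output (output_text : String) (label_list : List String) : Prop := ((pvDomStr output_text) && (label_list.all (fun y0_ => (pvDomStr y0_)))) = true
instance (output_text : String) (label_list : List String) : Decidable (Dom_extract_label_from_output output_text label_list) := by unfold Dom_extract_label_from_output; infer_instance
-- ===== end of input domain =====

-- B replaces A's three sequential scans by one pass keeping the best (category, first-index) match; alternative decomposition, same cost.

-- ===== PORT A =====
def extract_label_from_output (output_text : String) (label_list : List String) : String :=
  let tl := PySem.Str.lower (PySem.Str.strip output_text)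
  match label_list.find? (fun lab => tl == PySem.Str.lower lab) with
  | some lab => lab
  | none =>
    match label_list.find? (fun lab => PySem.Str.isIn (PySem.Str.lower lab) tl) with
    | some lab => lab
    | none =>
      if tl ≠ "" then
        let ft := (PySem.Str.split₀ tl).headD ""
        match label_list.find? (fun lab => PySem.Str.startswith (PySem.Str.lower lab) ft) with
        | some lab => lab
        | none => label_list.headD ""   -- label_list[0]; Pre_ guarantees nonempty
      else label_list.headD ""

-- ===== PORT B =====
-- B's loop: one pass; exact match returns at once; substring/prefix checks run only
-- while they could still improve the best (category, first-index) match.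
def pvLoop (tl : String) (ft : Option String) : List String → Nat → Option String → Option String
  | [], _, bl => bl
  | x :: xs, bc, bl =>
    let ll := PySem.Str.lower x
    if tl == ll then some x
    else if decide (1 < bc) && PySem.Str.isIn ll tl then pvLoop tl ft xs 1 (some x)
    else match ft with
      | some t =>
        if decide (2 < bc) && PySem.Str.startswith ll t then pvLoop tl ft xs 2 (some x)
        else pvLoop tl ft xs bc bl
      | none => pvLoop tl ft xs bc bl

def extract_label_from_output_alt (output_text : String) (label_list : List String) : String :=
  let tl := PySem.Str.lower (PySem.Str.strip output_text)
  let ft : Option String := if tl ≠ "" then some ((PySem.Str.split₀ tl).headD "") else none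
  match pvLoop tl ft label_list 3 none with
  | some lab => lab
  | none => label_list.headD ""   -- label_list[0]; Pre_ guarantees nonempty

-- ===== PRECONDITION & SPEC =====
-- Pre_ excludes only the empty label list, on which A (and B) raise IndexError at label_list[0].
def Pre_extract_label_from_output (output_text : String) (label_list : List String) : Prop := label_list ≠ []
instance (output_text : String) (label_list : List String) : Decidable (Pre_extract_label_from_output output_text label_list) := by unfold Pre_extract_label_from_output; infer_instance
def pvWitness_extract_label_from_output : String × List String := (" Cat ", ["dog", "cat"])
def Spec_extract_label_from_output (output_text : String) (label_list : List String) (out : String) : Prop := out = extract_label_from_output_alt output_text label_list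
instance (output_text : String) (label_list : List String) (out : String) : Decidable (Spec_extract_label_from_output output_text label_list out) := by unfold Spec_extract_label_from_output; infer_instance

-- ===== CLAIM (what is proved, stated in full; the proofs are below) =====
def Claim_equal_extract_label_from_output : Prop := ∀ (output_text : String) (label_list : List String), Dom_extract_label_from_output output_text label_list → Pre_extract_label_from_output output_text label_list → Spec_extract_label_from_output output_text label_list (extract_label_from_output output_text label_list)

-- ===== LEMMAS AND PROOFS =====

-- the three-scan result of A, packaged as (category, label)
def pvRes (tl : String) (ft : Option String) (ls : List String) : Option (Nat × String) :=
  match ls.find? (fun lab => tl == PySem.Str.lower lab) with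
  | some l => some (0, l)
  | none =>
    match ls.find? (fun lab => PySem.Str.isIn (PySem.Str.lower lab) tl) with
    | some l => some (1, l)
    | none =>
      match ft with
      | none => none
      | some t =>
        match ls.find? (fun lab => PySem.Str.startswith (PySem.Str.lower lab) t) with
        | some l => some (2, l)
        | none => none

-- in state bc = 1 only an exact match can still override the incumbent
theorem pvLoop_state1 (tl : String) (ft : Option String) (ls : List String) (b : String) :
    pvLoop tl ft ls 1 (some b) = some ((ls.find? (fun lab => tl == PySem.Str.lower lab)).getD b) := by
  induction ls generalizing b with
  | nil => rfl
  | cons x xs ih =>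
    simp only [pvLoop]
    by_cases h0 : (tl == PySem.Str.lower x) = true
    · rw [List.find?_cons_of_pos (by simpa using h0)]
      rw [if_pos h0]
      rfl
    · have h0' : (tl == PySem.Str.lower x) = false := by simpa using h0
      rw [List.find?_cons_of_neg (by simpa using h0')]
      rw [if_neg (by simp [h0'])]
      have hb1 : (decide (1 < 1) && PySem.Str.isIn (PySem.Str.lower x) tl) = false := by simp
      rw [hb1]
      have hb2 : ∀ t : String, (decide (2 < 1) && PySem.Str.startswith (PySem.Str.lower x) t) = false := by
        intro t; simp
      cases ft with
      | none => simpa using ih b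
      | some t =>
        simp only [hb2, Bool.false_eq_true, if_false]
        simpa using ih b

-- in state bc = 2 an exact match overrides, and a substring match demotes to state 1
theorem pvLoop_state2 (tl : String) (ft : Option String) (ls : List String) (b : String) :
    pvLoop tl ft ls 2 (some b) =
      some (match ls.find? (fun lab => tl == PySem.Str.lower lab) with
        | some l => l
        | none =>
          match ls.find? (fun lab => PySem.Str.isIn (PySem.Str.lower lab) tl) with
          | some l => l
          | none => b) := by
  induction ls generalizing b with
  | nil => rfl
  | cons x xs ih =>
    simp only [pvLoop]
    by_cases h0 : (tl == PySem.Str.lower x) = true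
    · rw [List.find?_cons_of_pos (by simpa using h0), if_pos h0]
    · have h0' : (tl == PySem.Str.lower x) = false := by simpa using h0
      rw [List.find?_cons_of_neg (by simpa using h0'), if_neg (by simp [h0'])]
      by_cases h1 : PySem.Str.isIn (PySem.Str.lower x) tl = true
      · rw [List.find?_cons_of_pos (by simpa using h1)]
        have hb1 : (decide (1 < 2) && PySem.Str.isIn (PySem.Str.lower x) tl) = true := by rw [h1]; decide
        rw [hb1]
        simp only [if_true]
        rw [pvLoop_state1]
        rcases hf0 : xs.find? (fun lab => tl == PySem.Str.lower lab) with _ | l0 <;> rfl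
      · have h1' : PySem.Str.isIn (PySem.Str.lower x) tl = false := by simpa using h1
        rw [List.find?_cons_of_neg (by simpa using h1')]
        have hb1 : (decide (1 < 2) && PySem.Str.isIn (PySem.Str.lower x) tl) = false := by rw [h1']; decide
        rw [hb1]
        have hb2 : ∀ t : String, (decide (2 < 2) && PySem.Str.startswith (PySem.Str.lower x) t) = false := by
          intro t; simp
        cases ft with
        | none => simpa using ih b
        | some t =>
          simp only [hb2, Bool.false_eq_true, if_false]
          simpa using ih b

-- from the initial state the loop computes exactly A's three-scan result
theorem pvLoop_char (tl : String) (ft : Option String) (ls : List String) :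
    pvLoop tl ft ls 3 none = (pvRes tl ft ls).map (fun p => p.2) := by
  induction ls with
  | nil => unfold pvRes; cases ft <;> rfl
  | cons x xs ih =>
    simp only [pvLoop]
    conv_rhs => unfold pvRes
    by_cases h0 : (tl == PySem.Str.lower x) = true
    · rw [List.find?_cons_of_pos (by simpa using h0), if_pos h0]
      rfl
    · have h0' : (tl == PySem.Str.lower x) = false := by simpa using h0
      rw [List.find?_cons_of_neg (by simpa using h0'), if_neg (by simp [h0'])]
      by_cases h1 : PySem.Str.isIn (PySem.Str.lower x) tl = true
      · rw [List.find?_cons_of_pos (by simpa using h1)]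
        have hb1 : (decide (1 < 3) && PySem.Str.isIn (PySem.Str.lower x) tl) = true := by rw [h1]; decide
        rw [hb1]
        simp only [if_true]
        rw [pvLoop_state1]
        rcases hf0 : xs.find? (fun lab => tl == PySem.Str.lower lab) with _ | l0 <;> rfl
      · have h1' : PySem.Str.isIn (PySem.Str.lower x) tl = false := by simpa using h1
        rw [List.find?_cons_of_neg (by simpa using h1')]
        have hb1 : (decide (1 < 3) && PySem.Str.isIn (PySem.Str.lower x) tl) = false := by rw [h1']; decide
        rw [hb1]
        simp only [Bool.false_eq_true, if_false]
        cases ft with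
        | none =>
          rw [ih]
          conv_rhs => unfold pvRes
          rfl
        | some t =>
          dsimp only
          by_cases h2 : PySem.Str.startswith (PySem.Str.lower x) t = true
          · have hb2 : (decide (2 < 3) && PySem.Str.startswith (PySem.Str.lower x) t) = true := by rw [h2]; decide
            rw [hb2]
            simp only [if_true]
            rw [pvLoop_state2]
            rw [List.find?_cons_of_pos (by simpa using h2)]
            rcases hf0 : xs.find? (fun lab => tl == PySem.Str.lower lab) with _ | l0
            · rcases hf1 : xs.find? (fun lab => PySem.Str.isIn (PySem.Str.lower lab) tl) with _ | l1 <;> rfl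
            · rfl
          · have h2' : PySem.Str.startswith (PySem.Str.lower x) t = false := by simpa using h2
            have hb2 : (decide (2 < 3) && PySem.Str.startswith (PySem.Str.lower x) t) = false := by rw [h2']; decide
            rw [hb2]
            simp only [Bool.false_eq_true, if_false]
            rw [ih]
            conv_rhs => unfold pvRes
            rw [List.find?_cons_of_neg (by simpa using h2')]
            rfl

-- ===== VERDICT (by name: the statement is the Claim_ definition above) =====
theorem extract_label_from_output_spec : Claim_equal_extract_label_from_output := by
  intro output_text label_list _ _
  unfold Spec_extract_label_from_output
  simp only [extract_label_from_output, extract_label_from_output_alt]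
  rw [pvLoop_char]
  by_cases he : PySem.Str.lower (PySem.Str.strip output_text) ≠ ""
  · rw [if_pos he, if_pos he]
    unfold pvRes
    rcases h0 : label_list.find? (fun lab => PySem.Str.lower (PySem.Str.strip output_text) == PySem.Str.lower lab) with _ | l0
    · rcases h1 : label_list.find? (fun lab => PySem.Str.isIn (PySem.Str.lower lab) (PySem.Str.lower (PySem.Str.strip output_text))) with _ | l1
      · dsimp only
        rcases h2 : label_list.find? (fun lab => PySem.Str.startswith (PySem.Str.lower lab) ((PySem.Str.split₀ (PySem.Str.lower (PySem.Str.strip output_text))).headD "")) with _ | l2 <;> rfl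
      · rfl
    · rfl
  · rw [if_neg he, if_neg he]
    unfold pvRes
    rcases h0 : label_list.find? (fun lab => PySem.Str.lower (PySem.Str.strip output_text) == PySem.Str.lower lab) with _ | l0
    · rcases h1 : label_list.find? (fun lab => PySem.Str.isIn (PySem.Str.lower lab) (PySem.Str.lower (PySem.Str.strip output_text))) with _ | l1 <;> rfl
    · rfl
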